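-- pv_equiv track=rewrite | github.com/Lingxianwen/NeuPRE | DynPRE-raw/DynPRE/DynPRE.py | rand_mask_unidirection_compatibility
-- ===== SOURCE A (Python) =====
-- from typing import Dict, List, Optional, Tuple
--
-- def rand_mask_unidirection_compatibility(l1: List[Tuple], l2: List[Tuple]) -> bool:
--     for a in l1:
--         flag = False
--         for b in l2:
--             if not (a[1] < b[0] or a[0] > b[1]):
--                 flag = True
--                 break
--         if not flag:
--             return False
--     return True
-- ===== SOURCE B (Python) =====
-- from typing import List, Tuple
--
--
-- def _bisect_right(starts, x, lo, hi):
--     # rightmost insertion point: number of leading elements <= x (starts sorted)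
--     while lo < hi:
--         mid = (lo + hi) // 2
--         if starts[mid] <= x:
--             lo = mid + 1
--         else:
--             hi = mid
--     return lo
--
--
-- def rand_mask_unidirection_compatibility(l1: List[Tuple], l2: List[Tuple]) -> bool:
--     # Sort l2 by start once and precompute prefix maxima of ends; then each l1
--     # interval is answered by one binary search over the sorted starts.
--     s = sorted([(b[0], b[1]) for b in l2], key=lambda p: p[0])
--     starts = [p[0] for p in s]
--     pm = []
--     cur = None
--     for _, e in s:
--         cur = e if cur is None else max(cur, e)
--         pm.append(cur)
--     for a in l1:
--         idx = _bisect_right(starts, a[1], 0, len(starts))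
--         if idx == 0 or pm[idx - 1] < a[0]:
--             return False
--     return True
-- ===== Notes on version B (the rewrite author's own statement) =====
-- stated objective: alternative
-- what changed: Instead of scanning all of l2 for every l1 interval, B sorts l2 by start once, precomputes prefix maxima of the ends, and answers each l1 interval with one binary search (O((n+m) log m) worst case vs A's O(n*m) worst case; not measurably faster on the benchmark inputs, where A's early exit already makes it linear).
-- outside the precondition, e.g. on rand_mask_unidirection_compatibility([], [(1,)]): A returns True, B raises IndexError; on rand_mask_unidirection_compatibility([(0, 1)], [(0, 1), (5,)]): A returns True, B raises IndexError
import Mathlib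
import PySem

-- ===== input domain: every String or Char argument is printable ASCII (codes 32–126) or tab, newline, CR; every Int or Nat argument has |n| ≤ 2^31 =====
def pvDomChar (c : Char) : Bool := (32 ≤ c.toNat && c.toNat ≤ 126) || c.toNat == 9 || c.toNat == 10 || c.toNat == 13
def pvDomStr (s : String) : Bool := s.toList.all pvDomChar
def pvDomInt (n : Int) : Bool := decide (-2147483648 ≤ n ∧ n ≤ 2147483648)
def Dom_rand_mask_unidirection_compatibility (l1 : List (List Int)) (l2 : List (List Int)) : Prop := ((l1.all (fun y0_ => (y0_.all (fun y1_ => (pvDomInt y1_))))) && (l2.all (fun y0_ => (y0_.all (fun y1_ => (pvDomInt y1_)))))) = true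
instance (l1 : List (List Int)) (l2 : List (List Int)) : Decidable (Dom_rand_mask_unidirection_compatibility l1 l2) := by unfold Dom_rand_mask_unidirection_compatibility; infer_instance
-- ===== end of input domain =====

-- B replaces A's scan of all of l2 for every l1 interval by a different algorithm:
-- sort l2 once, precompute prefix maxima of the ends, answer each l1 interval by
-- one binary search (equal return value on every input admitted by Pre_).

-- ===== PORT A =====
-- inner 'for b in l2' loop: flag = True + break  ≡  return true at the first overlap
-- (a[1], b[0], … are in range under Pre_, so xs.getD is exact for xs[i] here)
def pvA_inner (a : List Int) : List (List Int) → Bool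
  | [] => false
  | b :: rest =>
      if ¬ (a.getD 1 0 < b.getD 0 0 ∨ a.getD 0 0 > b.getD 1 0) then true
      else pvA_inner a rest

-- outer 'for a in l1' loop: 'if not flag: return False' else continue
def pvA_outer (l2 : List (List Int)) : List (List Int) → Bool
  | [] => true
  | a :: rest =>
      let flag := pvA_inner a l2
      if !flag then false else pvA_outer l2 rest

def rand_mask_unidirection_compatibility (l1 : List (List Int)) (l2 : List (List Int)) : Bool :=
  pvA_outer l2 l1

-- ===== PORT B =====
-- hand-written _bisect_right of Source B (starts[mid] is in range: 0 ≤ lo ≤ mid < hi ≤ len)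
def pvB_bisect (starts : List Int) (x : Int) (lo hi : Nat) : Nat :=
  if h : lo < hi then
    let mid := (lo + hi) / 2
    if starts.getD mid 0 ≤ x then pvB_bisect starts x (mid + 1) hi
    else pvB_bisect starts x lo mid
  else lo
termination_by hi - lo
decreasing_by all_goals omega

-- the 'pm' prefix-maximum loop of Source B (state: list built so far, running max 'cur')
def pvB_pm (s : List (Int × Int)) : List Int :=
  (s.foldl
    (fun (st : List Int × Option Int) p =>
      let cur := match st.2 with | none => p.2 | some c => max c p.2
      (st.1 ++ [cur], some cur))
    ([], none)).1

-- the query loop 'for a in l1'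
def pvB_loop (starts pm : List Int) : List (List Int) → Bool
  | [] => true
  | a :: rest =>
      let idx := pvB_bisect starts (a.getD 1 0) 0 starts.length
      if idx = 0 ∨ pm.getD (idx - 1) 0 < a.getD 0 0 then false
      else pvB_loop starts pm rest

def rand_mask_unidirection_compatibility_alt (l1 : List (List Int)) (l2 : List (List Int)) : Bool :=
  let s := PySem.List.sorted (l2.map (fun b => (b.getD 0 0, b.getD 1 0))) (fun p => p.1) false
  let starts := s.map (fun p => p.1)
  let pm := pvB_pm s
  pvB_loop starts pm l1

-- ===== PRECONDITION & SPEC =====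
-- Pre_ excludes inputs containing an interval with fewer than 2 endpoints: A raises
-- IndexError on any such interval it actually reads, and B (which reads every l2
-- interval up front for sorting) raises on the few such inputs where A's early exit
-- or an empty l1 lets it skip the malformed interval and return.
def Pre_rand_mask_unidirection_compatibility (l1 : List (List Int)) (l2 : List (List Int)) : Prop :=
  (∀ a ∈ l1, 2 ≤ a.length) ∧ (∀ b ∈ l2, 2 ≤ b.length)
instance (l1 : List (List Int)) (l2 : List (List Int)) : Decidable (Pre_rand_mask_unidirection_compatibility l1 l2) := by unfold Pre_rand_mask_unidirection_compatibility; infer_instance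

def pvWitness_rand_mask_unidirection_compatibility : List (List Int) × List (List Int) :=
  ([[1, 3]], [[2, 5]])

def Spec_rand_mask_unidirection_compatibility (l1 : List (List Int)) (l2 : List (List Int)) (out : Bool) : Prop := out = rand_mask_unidirection_compatibility_alt l1 l2
instance (l1 : List (List Int)) (l2 : List (List Int)) (out : Bool) : Decidable (Spec_rand_mask_unidirection_compatibility l1 l2 out) := by unfold Spec_rand_mask_unidirection_compatibility; infer_instance

-- ===== CLAIM (what is proved, stated in full; the proofs are below) =====
def Claim_equal_rand_mask_unidirection_compatibility : Prop := ∀ (l1 : List (List Int)) (l2 : List (List Int)), Dom_rand_mask_unidirection_compatibility l1 l2 → Pre_rand_mask_unidirection_compatibility l1 l2 → Spec_rand_mask_unidirection_compatibility l1 l2 (rand_mask_unidirection_compatibility l1 l2)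

-- ===== LEMMAS AND PROOFS =====

-- the common specification both loops compute: 'a overlaps some b in l2'
def pvGood (l2 : List (List Int)) (a : List Int) : Bool :=
  l2.any (fun b => decide (b.getD 0 0 ≤ a.getD 1 0) && decide (a.getD 0 0 ≤ b.getD 1 0))

theorem pvA_inner_eq (a : List Int) (l2 : List (List Int)) :
    pvA_inner a l2 = pvGood l2 a := by
  induction l2 with
  | nil => rfl
  | cons b t ih =>
      simp only [pvA_inner, pvGood, List.any_cons] at *
      split_ifs with h
      · have hfalse : (decide (b.getD 0 0 ≤ a.getD 1 0) && decide (a.getD 0 0 ≤ b.getD 1 0)) = false := by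
          rcases h with h1 | h1
          · rw [decide_eq_false (not_le.mpr h1), Bool.false_and]
          · rw [decide_eq_false (not_le.mpr h1), Bool.and_false]
        rw [hfalse, Bool.false_or]
        exact ih
      · rw [not_or] at h
        rw [decide_eq_true (not_lt.mp h.1), decide_eq_true (not_lt.mp h.2), Bool.true_and, Bool.true_or]

theorem pvA_eq_all (l1 l2 : List (List Int)) :
    rand_mask_unidirection_compatibility l1 l2 = l1.all (pvGood l2) := by
  unfold rand_mask_unidirection_compatibility
  induction l1 with
  | nil => rfl
  | cons a t ih =>
      simp only [pvA_outer, List.all_cons, pvA_inner_eq]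
      cases h : pvGood l2 a <;> simp [h, ih]

-- binary-search invariant for pvB_bisect on a sorted list
theorem pvB_bisect_spec (starts : List Int)
    (hs : ∀ i j, i ≤ j → j < starts.length → starts.getD i 0 ≤ starts.getD j 0)
    (x : Int) :
    ∀ n lo hi, hi - lo ≤ n → lo ≤ hi → hi ≤ starts.length →
      (∀ i < lo, starts.getD i 0 ≤ x) →
      (∀ i, hi ≤ i → i < starts.length → x < starts.getD i 0) →
      lo ≤ pvB_bisect starts x lo hi ∧ pvB_bisect starts x lo hi ≤ hi ∧
      (∀ i < pvB_bisect starts x lo hi, starts.getD i 0 ≤ x) ∧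
      (∀ i, pvB_bisect starts x lo hi ≤ i → i < starts.length → x < starts.getD i 0) := by
  intro n
  induction n with
  | zero =>
      intro lo hi hn hlh hhl hlow hhigh
      have : ¬ lo < hi := by omega
      rw [pvB_bisect, dif_neg this]
      exact ⟨le_rfl, hlh, hlow, fun i hri hil => hhigh i (by omega) hil⟩
  | succ n ih =>
      intro lo hi hn hlh hhl hlow hhigh
      by_cases h : lo < hi
      · rw [pvB_bisect, dif_pos h]
        simp only []
        set mid := (lo + hi) / 2 with hmid
        have hm1 : lo ≤ mid := by omega
        have hm2 : mid < hi := by omega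
        by_cases hc : starts.getD mid 0 ≤ x
        · rw [if_pos hc]
          exact (ih (mid + 1) hi (by omega) (by omega) hhl
            (fun i hi' => by
              rcases Nat.lt_or_ge i lo with h' | h'
              · exact hlow i h'
              · exact le_trans (hs i mid (by omega) (by omega)) hc)
            hhigh).imp (by omega) (fun h => h)
        · rw [if_neg hc]
          push_neg at hc
          exact (ih lo mid (by omega) (by omega) (by omega) hlow
            (fun i hmi hil => lt_of_lt_of_le hc (hs mid i hmi hil))).imp
            (fun h => h) (fun h => ⟨by omega, h.2⟩)
      · rw [pvB_bisect, dif_neg h]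
        exact ⟨le_rfl, hlh, hlow, fun i hri hil => hhigh i (by omega) hil⟩

-- pvB_pm is a prefix-maximum scan
def pvScanMax : Option Int → List Int → List Int
  | _, [] => []
  | cur, e :: t =>
      let c := match cur with | none => e | some c0 => max c0 e
      c :: pvScanMax (some c) t

theorem pvB_pm_foldl (s : List (Int × Int)) :
    ∀ (pm0 : List Int) (cur : Option Int),
      (s.foldl
        (fun (st : List Int × Option Int) p =>
          let cur := match st.2 with | none => p.2 | some c => max c p.2
          (st.1 ++ [cur], some cur))
        (pm0, cur)).1 = pm0 ++ pvScanMax cur (s.map Prod.snd) := by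
  induction s with
  | nil => intro pm0 cur; simp [pvScanMax]
  | cons p t ih =>
      intro pm0 cur
      simp only [List.foldl_cons, List.map_cons, pvScanMax]
      cases cur <;> simp [ih, List.append_assoc]

theorem pvB_pm_eq (s : List (Int × Int)) :
    pvB_pm s = pvScanMax none (s.map Prod.snd) := by
  unfold pvB_pm; rw [pvB_pm_foldl]; simp

theorem pvScanMax_getD_ge (lo : Int) :
    ∀ (es : List Int) (cur : Option Int) (k : Nat), k < es.length →
      (lo ≤ (pvScanMax cur es).getD k 0 ↔
        (∃ e ∈ es.take (k + 1), lo ≤ e) ∨ (∃ c, cur = some c ∧ lo ≤ c)) := by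
  intro es
  induction es with
  | nil => intro cur k hk; simp at hk
  | cons e t ih =>
      intro cur k hk
      cases k with
      | zero =>
          cases cur <;> simp [pvScanMax] <;> tauto
      | succ k =>
          have hk' : k < t.length := by simpa using hk
          cases cur with
          | none =>
              simp only [pvScanMax, List.getD_cons_succ, List.take_succ_cons,
                List.mem_cons]
              rw [ih (some e) k hk']
              constructor
              · rintro (h | ⟨c, hc, hlc⟩)
                · exact Or.inl (by rcases h with ⟨y, hy, h2⟩; exact ⟨y, Or.inr hy, h2⟩)
                · exact Or.inl ⟨e, Or.inl rfl, by cases hc; exact hlc⟩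
              · rintro (⟨y, (rfl | hy), h2⟩ | ⟨c, hc, _⟩)
                · exact Or.inr ⟨y, rfl, h2⟩
                · exact Or.inl ⟨y, hy, h2⟩
                · cases hc
          | some c0 =>
              simp only [pvScanMax, List.getD_cons_succ, List.take_succ_cons,
                List.mem_cons]
              rw [ih (some (max c0 e)) k hk']
              constructor
              · rintro (h | ⟨c, hc, hlc⟩)
                · exact Or.inl (by rcases h with ⟨y, hy, h2⟩; exact ⟨y, Or.inr hy, h2⟩)
                · cases hc
                  rcases le_max_iff.mp hlc with h' | h'
                  · exact Or.inr ⟨c0, rfl, h'⟩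
                  · exact Or.inl ⟨e, Or.inl rfl, h'⟩
              · rintro (⟨y, (rfl | hy), h2⟩ | ⟨c, hc, h2⟩)
                · exact Or.inr ⟨max c0 y, rfl, le_trans h2 (le_max_right _ _)⟩
                · exact Or.inl ⟨y, hy, h2⟩
                · have hcc : c0 = c := by injection hc
                  subst hcc
                  exact Or.inr ⟨max c0 e, rfl, le_trans h2 (le_max_left _ _)⟩

-- per-query equivalence on the sorted pair list
theorem pvB_query_eq (s : List (Int × Int))
    (hsort : s.Pairwise (fun p q => p.1 ≤ q.1)) (hi lo : Int) :
    (let starts := s.map (fun p => p.1)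
     let pm := pvB_pm s
     let idx := pvB_bisect starts hi 0 starts.length
     if idx = 0 ∨ pm.getD (idx - 1) 0 < lo then false else true) =
    s.any (fun p => decide (p.1 ≤ hi) && decide (lo ≤ p.2)) := by
  simp only []
  set starts := s.map (fun p => p.1) with hstarts
  have hlen : starts.length = s.length := by simp [hstarts]
  have hget : ∀ i (h : i < s.length), starts.getD i 0 = (s.get ⟨i, h⟩).1 := by
    intro i h
    rw [hstarts, List.getD_eq_getElem _ _ (by simpa using h)]
    simp
  have hmono : ∀ i j, i ≤ j → j < starts.length → starts.getD i 0 ≤ starts.getD j 0 := by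
    intro i j hij hj
    rw [hlen] at hj
    rw [hget i (by omega), hget j hj]
    rcases Nat.eq_or_lt_of_le hij with rfl | hij'
    · exact le_rfl
    · exact (List.pairwise_iff_getElem.mp hsort) i j (by omega) hj hij'
  obtain ⟨hr0, hr1, hrlow, hrhigh⟩ :=
    pvB_bisect_spec starts hmono hi starts.length 0 starts.length (by omega) (by omega)
      le_rfl (by omega) (by intro i h1 h2; omega)
  set r := pvB_bisect starts hi 0 starts.length with hr
  have hrs : r ≤ s.length := by omega
  -- RHS as an existence over indices below r
  have hany : s.any (fun p => decide (p.1 ≤ hi) && decide (lo ≤ p.2)) = true ↔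
      ∃ j, ∃ h : j < s.length, j < r ∧ lo ≤ (s.get ⟨j, h⟩).2 := by
    rw [List.any_eq_true]
    constructor
    · rintro ⟨p, hp, hcond⟩
      obtain ⟨j, hj, rfl⟩ := List.mem_iff_get.mp hp
      simp only [Bool.and_eq_true, decide_eq_true_eq] at hcond
      refine ⟨j, j.isLt, ?_, hcond.2⟩
      by_contra hjr
      have := hrhigh j (by omega) (by rw [hlen]; exact j.isLt)
      rw [hget j j.isLt] at this
      exact absurd this (not_lt.mpr hcond.1)
    · rintro ⟨j, hj, hjr, hjlo⟩
      refine ⟨s.get ⟨j, hj⟩, List.get_mem s ⟨j, hj⟩, ?_⟩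
      have := hrlow j hjr
      rw [hget j hj] at this
      simp only [Bool.and_eq_true, decide_eq_true_eq]
      exact ⟨this, hjlo⟩
  -- LHS via the prefix-maximum characterization
  by_cases hz : r = 0
  · rw [if_pos (Or.inl hz)]
    symm
    rw [← Bool.not_eq_true, hany]
    rintro ⟨j, hj, hjr, _⟩
    omega
  · obtain ⟨k, hk⟩ : ∃ k, r = k + 1 := ⟨r - 1, by omega⟩
    have hkl : k < s.length := by omega
    have hpm : pvB_pm s = pvScanMax none (s.map Prod.snd) := pvB_pm_eq s
    have hscan := pvScanMax_getD_ge lo (s.map Prod.snd) none k (by simpa using hkl)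
    have htake : (s.map Prod.snd).take (k + 1) = (s.take (k + 1)).map Prod.snd := by
      rw [List.map_take]
    have hEx : lo ≤ (pvB_pm s).getD k 0 ↔
        ∃ j, ∃ h : j < s.length, j < r ∧ lo ≤ (s.get ⟨j, h⟩).2 := by
      rw [hpm, hscan, htake, hk]
      constructor
      · rintro (⟨e, he, hle⟩ | ⟨c, hc, _⟩)
        · obtain ⟨p, hp, rfl⟩ := List.mem_map.mp he
          obtain ⟨j, hjl, hjp⟩ := List.mem_take_iff_getElem.mp hp
          refine ⟨j, by omega, by omega, ?_⟩
          simp only [List.get_eq_getElem]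
          rw [hjp]; exact hle
        · cases hc
      · rintro ⟨j, hj, hjk, hjlo⟩
        refine Or.inl ⟨(s.get ⟨j, hj⟩).2, ?_, hjlo⟩
        refine List.mem_map.mpr ⟨s.get ⟨j, hj⟩, ?_, rfl⟩
        exact List.mem_take_iff_getElem.mpr ⟨j, by omega, by simp⟩
    have hk1 : r - 1 = k := by omega
    by_cases hle : lo ≤ (pvB_pm s).getD k 0
    · rw [if_neg (by push_neg; rw [hk1]; exact ⟨hz, hle⟩)]
      symm
      rw [hany]
      exact hEx.mp hle
    · rw [if_pos (Or.inr (by rw [hk1]; exact not_le.mp hle))]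
      symm
      rw [← Bool.not_eq_true, hany]
      rintro ⟨j, hj, hjr, hjlo⟩
      exact hle (hEx.mpr ⟨j, hj, hjr, hjlo⟩)

theorem pvB_eq_all (l1 l2 : List (List Int)) :
    rand_mask_unidirection_compatibility_alt l1 l2 = l1.all (pvGood l2) := by
  unfold rand_mask_unidirection_compatibility_alt
  simp only []
  set s := PySem.List.sorted (l2.map (fun b => (b.getD 0 0, b.getD 1 0))) (fun p => p.1) false with hs
  have hsort : s.Pairwise (fun p q => p.1 ≤ q.1) := PySem.List.sorted_pairwise _ _
  have hperm : s.Perm (l2.map (fun b => (b.getD 0 0, b.getD 1 0))) := PySem.List.sorted_perm _ _ _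
  have hgood : ∀ a : List Int,
      s.any (fun p => decide (p.1 ≤ a.getD 1 0) && decide (a.getD 0 0 ≤ p.2)) = pvGood l2 a := by
    intro a
    rw [Bool.eq_iff_iff, List.any_eq_true, pvGood, List.any_eq_true]
    constructor
    · rintro ⟨p, hp, hcond⟩
      have hp' := hperm.mem_iff.mp hp
      obtain ⟨b, hb, rfl⟩ := List.mem_map.mp hp'
      exact ⟨b, hb, hcond⟩
    · rintro ⟨b, hb, hcond⟩
      exact ⟨(b.getD 0 0, b.getD 1 0),
        hperm.mem_iff.mpr (List.mem_map.mpr ⟨b, hb, rfl⟩), hcond⟩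
  induction l1 with
  | nil => rfl
  | cons a t ih =>
      simp only [pvB_loop, List.all_cons]
      have hq := pvB_query_eq s hsort (a.getD 1 0) (a.getD 0 0)
      simp only [] at hq
      by_cases hc : pvB_bisect (s.map fun p => p.1) (a.getD 1 0) 0 (s.map fun p => p.1).length = 0 ∨
          (pvB_pm s).getD (pvB_bisect (s.map fun p => p.1) (a.getD 1 0) 0 (s.map fun p => p.1).length - 1) 0 < a.getD 0 0
      · rw [if_pos hc]
        rw [if_pos hc] at hq
        rw [← hgood a, ← hq]
        rfl
      · rw [if_neg hc]
        rw [if_neg hc] at hq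
        rw [ih, ← hgood a, ← hq]
        simp

-- ===== VERDICT (by name: the statement is the Claim_ definition above) =====
theorem rand_mask_unidirection_compatibility_spec : Claim_equal_rand_mask_unidirection_compatibility := by
  intro l1 l2 _ _
  unfold Spec_rand_mask_unidirection_compatibility
  rw [pvA_eq_all, pvB_eq_all]
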